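-- pv_equiv track=rewrite | github.com/yunusemregul0/PythonNumberGame | 211307009.py | sutun_bos_mu
-- ===== SOURCE A (Python) =====
-- def sutun_bos_mu(sayilar_matrisi):
--     bos_sutunlar = []
--     for i in range(len(sayilar_matrisi[0])):
--         sutun = [sayilar_matrisi[j][i] for j in range(len(sayilar_matrisi))]
--         if all(val == "" for val in sutun):
--             bos_sutunlar.append(i)  # burada satirlardaki gibi insert islemi yapilmadi cunku burda ilk giren elemanin ilk eklenmesini istiyoruz
--
--     for i in range(len(sayilar_matrisi)):
--         for j in bos_sutunlar:
--             for k in range(j + 1, len(sayilar_matrisi[0])):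
--                 temp = sayilar_matrisi[i][k]
--                 sayilar_matrisi[i][k] = sayilar_matrisi[i][k - 1]
--                 sayilar_matrisi[i][k - 1] = temp
--     return sayilar_matrisi
-- ===== SOURCE B (Python) =====
-- # Compute the column permutation once (pop/append on an index list), then apply it to
-- # every row, instead of bubbling every element row by row.  Note: A swaps inside the
-- # inner row lists in place; B rebinds each outer slot to a freshly built row (the
-- # returned value is identical).
-- def sutun_bos_mu(sayilar_matrisi):
--     genislik = len(sayilar_matrisi[0])
--     bos_sutunlar = [i for i in range(genislik)
--                     if all(satir[i] == "" for satir in sayilar_matrisi)]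
--     perm = list(range(genislik))
--     for j in bos_sutunlar:
--         perm.append(perm.pop(j))
--     for i, satir in enumerate(sayilar_matrisi):
--         sayilar_matrisi[i] = [satir[p] for p in perm] + satir[genislik:]
--     return sayilar_matrisi
-- ===== Notes on version B (the rewrite author's own statement) =====
-- stated objective: alternative
-- what changed: B computes the column permutation once by pop/append on an index list and applies it to every row, instead of A's per-row swap bubbling of every empty column across the whole width; the advantage grows with the number of empty columns, but a timing run read only around 1.5x on its random inputs, so no unqualified speed is claimed.
import Mathlib
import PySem

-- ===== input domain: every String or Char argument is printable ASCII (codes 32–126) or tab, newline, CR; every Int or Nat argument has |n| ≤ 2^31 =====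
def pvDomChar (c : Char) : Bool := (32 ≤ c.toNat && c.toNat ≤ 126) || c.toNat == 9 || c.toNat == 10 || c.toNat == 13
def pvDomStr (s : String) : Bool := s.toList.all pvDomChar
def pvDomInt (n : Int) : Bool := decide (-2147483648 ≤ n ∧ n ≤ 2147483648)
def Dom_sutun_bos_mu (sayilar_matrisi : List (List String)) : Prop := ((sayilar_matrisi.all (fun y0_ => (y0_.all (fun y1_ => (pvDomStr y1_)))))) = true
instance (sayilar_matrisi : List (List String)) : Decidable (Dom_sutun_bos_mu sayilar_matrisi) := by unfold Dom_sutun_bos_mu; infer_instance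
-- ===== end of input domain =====

-- B computes the column permutation once (pop/append on an index list) and applies it to
-- every row, instead of A's per-row bubbling; equivalence is about the RETURN value only
-- (A swaps inside the inner lists in place, B rebuilds each row).

-- ===== PORT A =====

-- temp = row[k]; row[k] = row[k-1]; row[k-1] = temp   (k is in range whenever Python does not raise;
-- getD's default is never used on admitted inputs)
def pvSwapStep {α : Type} (d : α) (row : List α) (k : Nat) : List α :=
  let temp := row.getD k d
  ((row.set k (row.getD (k-1) d)).set (k-1) temp)

-- for k in range(j+1, genislik): swap(row, k, k-1)   (range(j+1, genislik) = List.range' (j+1) (genislik-(j+1)), exact for these Nat bounds)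
def pvBubble (row : List String) (j genislik : Nat) : List String :=
  (List.range' (j+1) (genislik - (j+1))).foldl (pvSwapStep "") row

def sutun_bos_mu (sayilar_matrisi : List (List String)) : List (List String) :=
  -- len(sayilar_matrisi[0]); Pre_ excludes the empty matrix, where Python raises IndexError
  let genislik := (sayilar_matrisi.headD []).length
  -- first loop: collect the indices of the all-"" columns (column built by indexing each row;
  -- getD's default is never used on admitted inputs, where every row has length ≥ genislik)
  let bos_sutunlar := (List.range genislik).filter
      (fun i => sayilar_matrisi.all (fun satir => satir.getD i "" == ""))
  -- second loop: each row is mutated independently: for j in bos_sutunlar bubble position j to the end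
  sayilar_matrisi.map (fun satir => bos_sutunlar.foldl (fun r j => pvBubble r j genislik) satir)

-- ===== PORT B =====

-- perm.append(perm.pop(j)); pop never fails on admitted inputs (j < len(perm))
def pvPopAppend (perm : List Nat) (j : Nat) : List Nat :=
  match PySem.List.pop? perm (j : Int) with
  | some (v, rest) => rest ++ [v]
  | none => perm

def sutun_bos_mu_alt (sayilar_matrisi : List (List String)) : List (List String) :=
  let genislik := (sayilar_matrisi.headD []).length
  let bos_sutunlar := (List.range genislik).filter
      (fun i => sayilar_matrisi.all (fun satir => satir.getD i "" == ""))
  let perm := bos_sutunlar.foldl pvPopAppend (List.range genislik)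
  sayilar_matrisi.map (fun satir => perm.map (fun p => satir.getD p "") ++ satir.drop genislik)

-- ===== PRECONDITION & SPEC =====
-- Exactly the inputs on which the Python A returns: a nonempty matrix raises IndexError on
-- sayilar_matrisi[0], and a row shorter than row 0 raises IndexError when indexed at a column ≥ its length.
def Pre_sutun_bos_mu (sayilar_matrisi : List (List String)) : Prop :=
  sayilar_matrisi ≠ [] ∧
    ∀ satir ∈ sayilar_matrisi, (sayilar_matrisi.headD []).length ≤ satir.length
instance (sayilar_matrisi : List (List String)) : Decidable (Pre_sutun_bos_mu sayilar_matrisi) := by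
  unfold Pre_sutun_bos_mu; infer_instance

def pvWitness_sutun_bos_mu : List (List String) := [["1", "", "3"], ["4", "", "6"]]

def Spec_sutun_bos_mu (sayilar_matrisi : List (List String)) (out : List (List String)) : Prop := out = sutun_bos_mu_alt sayilar_matrisi
instance (sayilar_matrisi : List (List String)) (out : List (List String)) : Decidable (Spec_sutun_bos_mu sayilar_matrisi out) := by unfold Spec_sutun_bos_mu; infer_instance

-- ===== CLAIM (what is proved, stated in full; the proofs are below) =====
def Claim_equal_sutun_bos_mu : Prop := ∀ (sayilar_matrisi : List (List String)), Dom_sutun_bos_mu sayilar_matrisi → Pre_sutun_bos_mu sayilar_matrisi → Spec_sutun_bos_mu sayilar_matrisi (sutun_bos_mu sayilar_matrisi)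

-- ===== LEMMAS AND PROOFS =====

-- One swap at position u.length+1 exchanges the two elements after the prefix u.
theorem pvSwapStep_decomp {α : Type} (d : α) (u : List α) (a b : α) (v : List α) :
    pvSwapStep d (u ++ a :: b :: v) (u.length + 1) = u ++ b :: a :: v := by
  simp [pvSwapStep]

-- The bubble fold over range' (u.length+1) n moves the element after prefix u past the next n elements.
theorem bubble_decomp {α : Type} (d : α) :
    ∀ (n : Nat) (u : List α) (a : α) (v t : List α), v.length = n →
    (List.range' (u.length + 1) n).foldl (pvSwapStep d) (u ++ a :: (v ++ t)) = u ++ v ++ a :: t := by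
  intro n
  induction n with
  | zero => intro u a v t hv; simp [List.length_eq_zero_iff.mp hv]
  | succ n ih =>
    intro u a v t hv
    match v, hv with
    | b :: v, hv =>
      rw [List.range'_succ, List.foldl_cons]
      have h1 : u ++ a :: (b :: v ++ t) = u ++ a :: b :: (v ++ t) := by simp
      rw [h1, pvSwapStep_decomp]
      have h2 : u ++ b :: a :: (v ++ t) = (u ++ [b]) ++ a :: (v ++ t) := by simp
      have h3 : u.length + 1 + 1 = (u ++ [b]).length + 1 := by simp
      rw [h2, h3, ih (u ++ [b]) a v t (by simpa using hv)]
      simp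

-- One bubble pass on a mapped-permutation row equals pop/append on the index list.
theorem bubble_popAppend (g : Nat → String) (perm : List Nat) (t : List String)
    (genislik j : Nat) (hlen : perm.length = genislik) (hj : j < genislik) :
    pvBubble (perm.map g ++ t) j genislik = (pvPopAppend perm j).map g ++ t := by
  have hjp : j < perm.length := hlen ▸ hj
  have hdecomp : perm = perm.take j ++ perm[j] :: perm.drop (j+1) := by
    conv_lhs => rw [← List.take_append_drop j perm]
    rw [List.getElem_cons_drop hjp]
  have hpop : pvPopAppend perm j = (perm.take j ++ perm.drop (j+1)) ++ [perm[j]] := by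
    unfold pvPopAppend
    rw [PySem.List.pop?_natCast perm j hjp, List.eraseIdx_eq_take_drop_succ]
  have htake : (perm.take j).length = j := List.length_take_of_le (Nat.le_of_lt hjp)
  have hdroplen : (perm.drop (j+1)).length = genislik - (j+1) := by
    rw [List.length_drop, hlen]
  have hmain := bubble_decomp "" (genislik - (j+1)) ((perm.take j).map g) (g perm[j])
      ((perm.drop (j+1)).map g) t (by simpa using hdroplen)
  rw [List.length_map, htake] at hmain
  unfold pvBubble
  conv_lhs => rw [hdecomp]
  simp only [List.map_append, List.map_cons, List.append_assoc, List.cons_append] at hmain ⊢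
  rw [hmain, hpop]
  simp

theorem popAppend_length (perm : List Nat) (j : Nat) (h : j < perm.length) :
    (pvPopAppend perm j).length = perm.length := by
  unfold pvPopAppend
  rw [PySem.List.pop?_natCast perm j h]
  simp [List.length_eraseIdx, h]
  omega

theorem foldl_bubble_popAppend (g : Nat → String) (t : List String) (genislik : Nat) :
    ∀ (es : List Nat) (perm : List Nat), (∀ j ∈ es, j < genislik) → perm.length = genislik →
    es.foldl (fun r j => pvBubble r j genislik) (perm.map g ++ t) =
      (es.foldl pvPopAppend perm).map g ++ t := by
  intro es
  induction es with
  | nil => intro perm _ _; simp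
  | cons j es ih =>
    intro perm hes hlen
    have hj : j < genislik := hes j (by simp)
    rw [List.foldl_cons, List.foldl_cons,
        bubble_popAppend g perm t genislik j hlen hj,
        ih (pvPopAppend perm j) (fun x hx => hes x (by simp [hx]))
          (by rw [popAppend_length perm j (hlen ▸ hj)]; exact hlen)]

theorem range_map_getD (row : List String) :
    ∀ (n : Nat), n ≤ row.length →
    (List.range n).map (fun i => row.getD i "") = row.take n := by
  intro n
  induction n with
  | zero => intro _; simp
  | succ n ih =>
    intro h
    have hn : n < row.length := h
    rw [List.range_succ, List.map_append, ih (Nat.le_of_lt hn), List.map_singleton,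
        List.take_add_one, List.getElem?_eq_getElem hn]
    simp [List.getD, List.getElem?_eq_getElem hn]

-- ===== VERDICT (by name: the statement is the Claim_ definition above) =====
theorem sutun_bos_mu_spec : Claim_equal_sutun_bos_mu := by
  intro m _ hpre
  obtain ⟨hne, hrows⟩ := hpre
  unfold Spec_sutun_bos_mu sutun_bos_mu sutun_bos_mu_alt
  apply List.map_congr_left
  intro satir hmem
  have hC : (m.headD []).length ≤ satir.length := hrows satir hmem
  have hbase : (List.range (m.headD []).length).map (fun i => satir.getD i "")
      ++ satir.drop (m.headD []).length = satir := by
    rw [range_map_getD satir _ hC, List.take_append_drop]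
  have hes : ∀ j ∈ (List.range (m.headD []).length).filter
      (fun i => m.all (fun r => r.getD i "" == "")), j < (m.headD []).length := by
    intro j hjmem
    exact List.mem_range.mp (List.mem_of_mem_filter hjmem)
  have := foldl_bubble_popAppend (fun i => satir.getD i "")
      (satir.drop (m.headD []).length) (m.headD []).length
      ((List.range (m.headD []).length).filter
        (fun i => m.all (fun r => r.getD i "" == "")))
      (List.range (m.headD []).length) hes (by simp)
  rw [hbase] at this
  exact this
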